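-- pv_equiv track=rewrite | github.com/AntMassia/pensamento_excs | exercicios/exc14.py | extrair_elemento
-- ===== SOURCE A (Python) =====
-- def extrair_elemento(lista, n):
--     elementos = []
--     for tupla in lista:
--         if len(tupla) > n:
--             elementos.append(tupla[n])
--         else:
--             raise IndexError("Índice fora dos limites para pelo menos uma das tuplas")
--
--     return elementos
-- ===== SOURCE B (Python) =====
-- def extrair_elemento(lista, n):
--     if any(len(tupla) <= n for tupla in lista):
--         raise IndexError("Índice fora dos limites para pelo menos uma das tuplas")
--     return [tupla[n] for tupla in lista]
-- ===== Notes on version B (the rewrite author's own statement) =====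
-- stated objective: idiomatic
-- what changed: B separates the work into a validation pass (any(...) then raise) followed by a single list comprehension, instead of A's one interleaved loop that appends into an accumulator and raises mid-loop; abort-on-first-failure means the results coincide wherever A returns.
import Mathlib
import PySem

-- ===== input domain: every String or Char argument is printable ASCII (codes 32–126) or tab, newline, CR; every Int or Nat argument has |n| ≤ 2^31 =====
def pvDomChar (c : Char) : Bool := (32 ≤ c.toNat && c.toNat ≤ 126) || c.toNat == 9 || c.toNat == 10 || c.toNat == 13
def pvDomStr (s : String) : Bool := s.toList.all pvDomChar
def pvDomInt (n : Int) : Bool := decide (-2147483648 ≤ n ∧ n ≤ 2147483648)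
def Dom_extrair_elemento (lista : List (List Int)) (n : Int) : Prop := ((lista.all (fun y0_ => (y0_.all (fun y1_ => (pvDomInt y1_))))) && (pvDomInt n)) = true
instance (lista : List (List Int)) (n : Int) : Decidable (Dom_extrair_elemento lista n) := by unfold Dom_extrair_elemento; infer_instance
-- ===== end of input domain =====

-- B replaces A's single interleaved loop (append-or-raise) by a validation pass followed by
-- a list-comprehension extraction pass; equivalence of RETURN values is proved on Pre_ (no raise).

-- ===== PORT A =====
-- A's loop: append tupla[n] while len(tupla) > n, else raise (port stops, returning the
-- accumulator; such inputs are outside Pre_).  tupla[n] via PySem.List.pyGet? (none = raise).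
def extrair_elemento_go (n : Int) (elementos : List Int) : List (List Int) → List Int
  | [] => elementos
  | tupla :: rest =>
    if n < (tupla.length : Int) then
      match PySem.List.pyGet? tupla n with
      | some x => extrair_elemento_go n (elementos ++ [x]) rest
      | none => elementos          -- IndexError from tupla[n] (negative n too small): outside Pre_
    else elementos                 -- raise IndexError("Índice fora ..."): outside Pre_

def extrair_elemento (lista : List (List Int)) (n : Int) : List Int :=
  extrair_elemento_go n [] lista

-- ===== PORT B =====
def extrair_elemento_alt (lista : List (List Int)) (n : Int) : List Int :=
  if lista.any (fun tupla => (tupla.length : Int) ≤ n) then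
    []                             -- raise IndexError: outside Pre_
  else
    lista.map (fun tupla => (PySem.List.pyGet? tupla n).getD 0)  -- getD never used on Pre_

-- ===== PRECONDITION & SPEC =====
-- Pre_: every tuple admits index n (Python indexing, negative allowed); exactly where A returns.
def Pre_extrair_elemento (lista : List (List Int)) (n : Int) : Prop :=
  ∀ tupla ∈ lista, (0 ≤ n ∧ n < (tupla.length : Int)) ∨ (n < 0 ∧ -n ≤ (tupla.length : Int))
instance (lista : List (List Int)) (n : Int) : Decidable (Pre_extrair_elemento lista n) := by
  unfold Pre_extrair_elemento; infer_instance

def pvWitness_extrair_elemento : List (List Int) × Int := ([[1, 2], [3, 4]], 1)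

def Spec_extrair_elemento (lista : List (List Int)) (n : Int) (out : List Int) : Prop := out = extrair_elemento_alt lista n
instance (lista : List (List Int)) (n : Int) (out : List Int) : Decidable (Spec_extrair_elemento lista n out) := by unfold Spec_extrair_elemento; infer_instance

-- ===== CLAIM (what is proved, stated in full; the proofs are below) =====
def Claim_equal_extrair_elemento : Prop := ∀ (lista : List (List Int)) (n : Int), Dom_extrair_elemento lista n → Pre_extrair_elemento lista n → Spec_extrair_elemento lista n (extrair_elemento lista n)

-- ===== LEMMAS AND PROOFS =====

-- ===== VERDICT (by name: the statement is the Claim_ definition above) =====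
-- On Pre_, pyGet? is some for every tuple.
theorem pyGet_isSome_of_pre (tupla : List Int) (n : Int)
    (h : (0 ≤ n ∧ n < (tupla.length : Int)) ∨ (n < 0 ∧ -n ≤ (tupla.length : Int))) :
    (PySem.List.pyGet? tupla n).isSome := by
  rw [← Option.ne_none_iff_isSome, ne_eq, PySem.List.pyGet?_eq_none_iff]
  simp [PySem.Raise.InRange]
  omega

theorem go_eq_map (n : Int) (acc : List Int) (lista : List (List Int))
    (h : ∀ tupla ∈ lista, (0 ≤ n ∧ n < (tupla.length : Int)) ∨ (n < 0 ∧ -n ≤ (tupla.length : Int))) :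
    extrair_elemento_go n acc lista = acc ++ lista.map (fun t => (PySem.List.pyGet? t n).getD 0) := by
  induction lista generalizing acc with
  | nil => simp [extrair_elemento_go]
  | cons t rest ih =>
    have ht := h t (by simp)
    have hlen : n < (t.length : Int) := by omega
    have hsome := pyGet_isSome_of_pre t n ht
    obtain ⟨x, hx⟩ := Option.isSome_iff_exists.mp hsome
    simp only [extrair_elemento_go, if_pos hlen, hx, List.map_cons]
    rw [ih (acc ++ [x]) (fun u hu => h u (List.mem_cons_of_mem _ hu))]
    simp

theorem extrair_elemento_spec : Claim_equal_extrair_elemento := by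
  intro lista n _ hpre
  unfold Spec_extrair_elemento extrair_elemento extrair_elemento_alt
  have hany : lista.any (fun tupla => decide ((tupla.length : Int) ≤ n)) = false := by
    simp only [List.any_eq_false, decide_eq_true_eq]
    intro t ht
    have := hpre t ht
    omega
  rw [go_eq_map n [] lista hpre]
  simp [hany]
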